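-- pv_equiv track=rewrite | github.com/MDDAIEXPOSER/algoritmics | algos_23_11_5.py | function
-- ===== SOURCE A (Python) =====
-- def function(cost):
--     inn = len(cost)
--     que = [0]*inn
--     counter = 1
--     for i in range(inn):
--         if i == 0:
--             que[0] = 1
--             continue
--         elif cost[i-1]-cost[i]==1:
--             que[i]=que[i-1]+1+counter
--             counter = counter + 1
--         else:
--             que[i] = que[i-1] + 1
--             counter = 1
--     return que[-1]
-- ===== SOURCE B (Python) =====
-- def function(cost):
--     n = len(cost)
--     flags = [cost[j] - cost[j + 1] == 1 for j in range(n - 1)]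
--     total = n
--     run = 0
--     for f in flags + [False]:
--         if f:
--             run += 1
--         else:
--             total += run * (run + 1) // 2
--             run = 0
--     return total
-- ===== Notes on version B (the rewrite author's own statement) =====
-- stated objective: alternative
-- what changed: Replaces A's que-array element-wise accumulator with counter resets by building the adjacent-difference flag list once and summing a triangular-number closed form L*(L+1)//2 per run of consecutive flags.
import Mathlib
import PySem

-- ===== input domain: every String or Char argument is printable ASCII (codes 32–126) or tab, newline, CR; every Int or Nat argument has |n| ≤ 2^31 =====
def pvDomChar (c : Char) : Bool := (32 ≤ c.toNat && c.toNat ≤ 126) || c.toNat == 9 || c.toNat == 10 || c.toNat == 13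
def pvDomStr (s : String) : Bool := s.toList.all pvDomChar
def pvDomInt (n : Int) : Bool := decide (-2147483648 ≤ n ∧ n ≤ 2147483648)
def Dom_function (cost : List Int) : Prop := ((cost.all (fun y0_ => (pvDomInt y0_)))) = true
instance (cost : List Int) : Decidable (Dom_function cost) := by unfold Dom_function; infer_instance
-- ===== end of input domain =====

-- B replaces A's element-wise que-array accumulator with a run-length grouping of the
-- adjacent-difference flags and a triangular-number closed form per run (alternative
-- decomposition, same asymptotic cost). Return-value equivalence on nonempty lists.

-- ===== PORT A =====
-- A's loop body (branches in A's order; indices are in range, so getD is exact)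
def functionStep (cost : List Int) (st : List Int × Int) (i : Nat) : List Int × Int :=
  if i = 0 then (st.1.set 0 1, st.2)
  else if cost.getD (i-1) 0 - cost.getD i 0 = 1 then
    (st.1.set i (st.1.getD (i-1) 0 + 1 + st.2), st.2 + 1)
  else
    (st.1.set i (st.1.getD (i-1) 0 + 1), 1)

def function (cost : List Int) : Int :=
  let inn := cost.length
  let que : List Int := List.replicate inn 0
  let st := (List.range inn).foldl (functionStep cost) (que, 1)
  (PySem.List.pyGet? st.1 (-1)).getD 0   -- que[-1]: IndexError on empty cost, excluded by Pre_

-- ===== PORT B =====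
-- flag j = (cost[j] - cost[j+1] == 1); indices are in range, so getD is exact
def altFlag (cost : List Int) (j : Nat) : Bool := decide (cost.getD j 0 - cost.getD (j+1) 0 = 1)

def altStep (st : Int × Int) (f : Bool) : Int × Int :=
  if f then (st.1, st.2 + 1)
  else (st.1 + PySem.Int.floordiv (st.2 * (st.2 + 1)) 2, 0)

def function_alt (cost : List Int) : Int :=
  let n := cost.length
  let flags := (List.range (n-1)).map (altFlag cost)
  ((flags ++ [false]).foldl altStep ((n : Int), 0)).1

-- ===== PRECONDITION & SPEC =====
-- Pre_ excludes only the empty list, on which A raises IndexError (que[-1] on []).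
def Pre_function (cost : List Int) : Prop := cost ≠ []
instance (cost : List Int) : Decidable (Pre_function cost) := by unfold Pre_function; infer_instance
def pvWitness_function : List Int := [3, 2, 5]

def Spec_function (cost : List Int) (out : Int) : Prop := out = function_alt cost
instance (cost : List Int) (out : Int) : Decidable (Spec_function cost out) := by unfold Spec_function; infer_instance

-- ===== CLAIM (what is proved, stated in full; the proofs are below) =====
def Claim_equal_function : Prop := ∀ (cost : List Int), Dom_function cost → Pre_function cost → Spec_function cost (function cost)

-- ===== LEMMAS AND PROOFS =====

-- Invariant tying A's state after indices 0..k to B's state after the first k flags: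
-- que has full length, que[k] = (k+1) + (completed-run total − n) + T(current run r),
-- counter = r + 1, and r ≥ 0.
lemma function_inv (cost : List Int) (k : Nat) (hk : k < cost.length) :
    ((List.range (k+1)).foldl (functionStep cost) (List.replicate cost.length 0, 1)).1.length = cost.length ∧
    0 ≤ (((List.range k).map (altFlag cost)).foldl altStep ((cost.length : Int), 0)).2 ∧
    ((List.range (k+1)).foldl (functionStep cost) (List.replicate cost.length 0, 1)).2 =
      (((List.range k).map (altFlag cost)).foldl altStep ((cost.length : Int), 0)).2 + 1 ∧
    ((List.range (k+1)).foldl (functionStep cost) (List.replicate cost.length 0, 1)).1.getD k 0 =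
      ((k : Int)+1) + ((((List.range k).map (altFlag cost)).foldl altStep ((cost.length : Int), 0)).1 - (cost.length : Int)) +
      PySem.Int.floordiv ((((List.range k).map (altFlag cost)).foldl altStep ((cost.length : Int), 0)).2 *
        ((((List.range k).map (altFlag cost)).foldl altStep ((cost.length : Int), 0)).2 + 1)) 2 := by
  induction k with
  | zero =>
      have h0 : 0 < cost.length := hk
      refine ⟨?_, ?_, ?_, ?_⟩ <;>
        simp [functionStep, List.getD, h0, PySem.Int.floordiv]
  | succ k ih =>
      have hk' : k < cost.length := Nat.lt_of_succ_lt hk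
      obtain ⟨hlen, hr0, hcnt, hque⟩ := ih hk'
      set sA := (List.range (k+1)).foldl (functionStep cost) (List.replicate cost.length 0, 1) with hsA
      set sB := ((List.range k).map (altFlag cost)).foldl altStep ((cost.length : Int), 0) with hsB
      have hA : (List.range (k+1+1)).foldl (functionStep cost) (List.replicate cost.length 0, 1)
          = functionStep cost sA (k+1) := by
        rw [List.range_succ, List.foldl_append]; simp [hsA]
      have hB : ((List.range (k+1)).map (altFlag cost)).foldl altStep ((cost.length : Int), 0)
          = altStep sB (altFlag cost k) := by
        rw [List.range_succ, List.map_append, List.foldl_append]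
        simp [hsB]
      have hkl : k + 1 < sA.1.length := by rw [hlen]; exact hk
      have hfd : ∀ a : Int, PySem.Int.floordiv a 2 = a / 2 := fun a =>
        PySem.Int.floordiv_eq_ediv_of_pos (by norm_num)
      rw [hA, hB]
      by_cases hf : cost.getD k 0 - cost.getD (k+1) 0 = 1
      · have hfl : altFlag cost k = true := by simp [altFlag]; exact hf
        refine ⟨?_, ?_, ?_, ?_⟩ <;>
          simp only [functionStep, altStep, hfl, Nat.succ_ne_zero, if_false,
            Nat.add_sub_cancel, hf, if_pos, List.length_set] 
        · exact hlen
        · omega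
        · omega
        · simp only [hfd] at hque ⊢
          rw [hque, hcnt]
          rw [List.getD_eq_getElem?_getD, List.getElem?_set_self hkl]
          simp only [Option.getD_some]
          have h2 : (sB.2*(sB.2+1) + (sB.2+1)*2) / 2 = sB.2*(sB.2+1)/2 + (sB.2+1) :=
            Int.add_mul_ediv_right _ _ (by norm_num)
          have h3 : (sB.2+1)*(sB.2+1+1) = sB.2*(sB.2+1) + (sB.2+1)*2 := by ring
          rw [h3, h2]
          push_cast
          omega
      · have hfl : altFlag cost k = false := by simp [altFlag]; exact hf
        refine ⟨?_, ?_, ?_, ?_⟩ <;>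
          simp only [functionStep, altStep, hfl, if_false, Bool.false_eq_true, Nat.succ_ne_zero,
            Nat.add_sub_cancel, hf, List.length_set]
        · exact hlen
        · omega
        · rfl
        · simp only [hfd] at hque ⊢
          rw [hque]
          rw [List.getD_eq_getElem?_getD, List.getElem?_set_self hkl]
          simp only [Option.getD_some]
          push_cast
          omega

-- ===== VERDICT (by name: the statement is the Claim_ definition above) =====
theorem function_spec : Claim_equal_function := by
  intro cost _ hpre
  have hn : 0 < cost.length := List.length_pos_iff.mpr hpre
  unfold Spec_function function function_alt
  show (PySem.List.pyGet? ((List.range cost.length).foldl (functionStep cost) (List.replicate cost.length 0, 1)).1 (-1)).getD 0 =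
    ((((List.range (cost.length - 1)).map (altFlag cost)) ++ [false]).foldl altStep ((cost.length : Int), 0)).1
  have hsucc : cost.length - 1 + 1 = cost.length := Nat.succ_pred_eq_of_pos hn
  obtain ⟨hlen, hr0, hcnt, hque⟩ := function_inv cost (cost.length - 1) (by omega)
  rw [hsucc] at hlen hcnt hque
  set sA := (List.range cost.length).foldl (functionStep cost) (List.replicate cost.length 0, 1) with hsA
  set sB := ((List.range (cost.length - 1)).map (altFlag cost)).foldl altStep ((cost.length : Int), 0) with hsB
  have hget : PySem.List.pyGet? sA.1 (-1) = sA.1[sA.1.length - 1]? := by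
    rw [PySem.List.pyGet?_neg_one, List.getLast?_eq_getElem?]
  rw [List.foldl_append, hget, hlen]
  have hlt : cost.length - 1 < sA.1.length := by omega
  rw [List.getD_eq_getElem?_getD] at hque
  simp only [List.foldl_cons, List.foldl_nil, altStep, Bool.false_eq_true, if_false]
  rw [hque]
  rw [← hsB]
  have : ((cost.length - 1 : Nat) : Int) + 1 = (cost.length : Int) := by push_cast [hn]; omega
  omega
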